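-- pv_equiv track=rewrite | github.com/omikhailk/project_euler_sols | python/problem011.py | right_to_left_diag
-- ===== SOURCE A (Python) =====
-- from math import prod
--
-- def right_to_left_diag(grid):
--     """
--     Returns the largest product in the grid of 4 adjacent numbers
--     in a diagonal (from right to left).
--     """
--     diag = []
--     for col in range(len(grid) - 1, 0, -4):
--         four_adj_nums = []
--         for row in range(0, len(grid) - 3):
--             for i in range(0, 4):
--                 four_adj_nums.append(grid[col - i][row + i])
--         diag.append(four_adj_nums)
--     nums = []
--     for index in range(0, len(diag)):
--         for sub in range(0, len(diag[index]) - 4, 4):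
--             nums.append([int(i) for i in diag[index][sub:sub+4]])
--     products = [prod(i) for i in nums]
--     return max(products)
-- ===== SOURCE B (Python) =====
-- def right_to_left_diag(grid):
--     """
--     Returns the largest product in the grid of 4 adjacent numbers
--     in a diagonal (from right to left).
--     """
--     n = len(grid)
--     products = []
--     for col in range(n - 1, 0, -4):
--         for row in range(0, n - 4):
--             p = 1
--             for i in range(4):
--                 p *= int(grid[col - i][row + i])
--             products.append(p)
--     return max(products)
-- ===== Notes on version B (the rewrite author's own statement) =====
-- stated objective: simpler
-- what changed: Replaces A's three-phase pipeline (build per-column flattened diagonal lists, re-chunk them by slicing at multiples of 4 while dropping the last chunk, then map prod and max) with a single direct pass that multiplies the 4 diagonal cells for each (col,row) and appends the product, folding the net effect of the dropped chunk into the row range(0, n-4).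
import Mathlib
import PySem

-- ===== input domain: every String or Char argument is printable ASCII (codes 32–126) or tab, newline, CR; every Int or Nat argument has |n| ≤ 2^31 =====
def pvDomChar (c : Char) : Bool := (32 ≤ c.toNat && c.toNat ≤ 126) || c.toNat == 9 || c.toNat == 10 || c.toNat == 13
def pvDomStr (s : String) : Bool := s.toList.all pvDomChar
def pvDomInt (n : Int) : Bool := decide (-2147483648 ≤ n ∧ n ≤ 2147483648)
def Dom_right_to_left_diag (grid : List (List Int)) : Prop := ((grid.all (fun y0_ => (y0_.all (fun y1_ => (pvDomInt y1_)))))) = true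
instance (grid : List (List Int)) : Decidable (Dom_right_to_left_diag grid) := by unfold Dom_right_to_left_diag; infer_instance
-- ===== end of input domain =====

-- B replaces A's build-then-rechunk-then-map pipeline by one direct pass that multiplies the 4
-- diagonal cells per (col,row) and takes the max at the end (simpler; same cost).

-- shared indexing expression grid[col-i][row+i] (both Pythons contain it literally;
-- pyGetD defaults are never reached inside Pre_)
def pvCell (grid : List (List Int)) (r c : Int) : Int :=
  PySem.List.pyGetD (PySem.List.pyGetD grid r []) c 0

-- ===== PORT A =====
def right_to_left_diag (grid : List (List Int)) : Int :=
  let n : Int := grid.length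
  let diag : List (List Int) :=
    (PySem.List.pyRange (n - 1) 0 (-4)).foldl (fun diag col =>
      diag ++ [(PySem.List.pyRange 0 (n - 3) 1).foldl (fun four row =>
        (PySem.List.pyRange 0 4 1).foldl (fun four i =>
          four ++ [pvCell grid (col - i) (row + i)]) four) []]) []
  let nums : List (List Int) :=
    (PySem.List.pyRange 0 (diag.length : Int) 1).foldl (fun nums index =>
      (PySem.List.pyRange 0 (((PySem.List.pyGetD diag index []).length : Int) - 4) 4).foldl
        (fun nums sub =>
          nums ++ [(PySem.List.slice (PySem.List.pyGetD diag index []) (some sub) (some (sub + 4))).map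
            (fun i => i)]) nums) []
  let products : List Int := nums.map (fun l => l.foldl (fun a x => a * x) 1)
  (PySem.List.max? products (fun x => x)).getD 0

-- ===== PORT B =====
def right_to_left_diag_alt (grid : List (List Int)) : Int :=
  let n : Int := grid.length
  let products : List Int :=
    (PySem.List.pyRange (n - 1) 0 (-4)).foldl (fun products col =>
      (PySem.List.pyRange 0 (n - 4) 1).foldl (fun products row =>
        products ++ [(PySem.List.pyRange 0 4 1).foldl (fun p i =>
          p * pvCell grid (col - i) (row + i)) 1]) products) []
  (PySem.List.max? products (fun x => x)).getD 0

-- ===== PRECONDITION & SPEC =====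
-- Exactly the inputs on which the Python A returns (checked against A on random grids): at least
-- 5 rows (otherwise no product exists and Python's max raises ValueError), and every row the
-- diagonal pattern reads — row col-i, Python's negative-index rule included — is long enough for
-- every column A touches (otherwise IndexError).
def Pre_right_to_left_diag (grid : List (List Int)) : Prop :=
  5 ≤ grid.length ∧
  ∀ col ∈ PySem.List.pyRange ((grid.length : Int) - 1) 0 (-4),
    ∀ i ∈ PySem.List.pyRange 0 4 1,
      (grid.length : Int) - 3 + i ≤ (((PySem.List.pyGet? grid (col - i)).getD []).length : Int)
instance (grid : List (List Int)) : Decidable (Pre_right_to_left_diag grid) := by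
  unfold Pre_right_to_left_diag; infer_instance
def pvWitness_right_to_left_diag : List (List Int) :=
  [[1, 2, 3, 4, 5], [6, 7, 8, 9, 10], [1, 1, 1, 1, 1], [2, 2, 2, 2, 2], [3, 3, 3, 3, 3]]
def Spec_right_to_left_diag (grid : List (List Int)) (out : Int) : Prop := out = right_to_left_diag_alt grid
instance (grid : List (List Int)) (out : Int) : Decidable (Spec_right_to_left_diag grid out) := by unfold Spec_right_to_left_diag; infer_instance

-- ===== CLAIM (what is proved, stated in full; the proofs are below) =====
def Claim_equal_right_to_left_diag : Prop := ∀ (grid : List (List Int)), Dom_right_to_left_diag grid → Pre_right_to_left_diag grid → Spec_right_to_left_diag grid (right_to_left_diag grid)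

-- ===== LEMMAS AND PROOFS =====

-- the 4-element diagonal block at (col, row)
def pvBlk (grid : List (List Int)) (col row : Int) : List Int :=
  [0, 1, 2, 3].map (fun i => pvCell grid (col - i) (row + i))

lemma pvBlk_length (grid : List (List Int)) (col row : Int) : (pvBlk grid col row).length = 4 := by
  simp [pvBlk]

lemma pvRange4 : PySem.List.pyRange 0 4 1 = [0, 1, 2, 3] := by decide

-- A's innermost i-loop appends one block
lemma pvInnerA (grid : List (List Int)) (col row : Int) (four : List Int) :
    (PySem.List.pyRange 0 4 1).foldl
      (fun four i => four ++ [pvCell grid (col - i) (row + i)]) four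
      = four ++ pvBlk grid col row := by
  rw [pvRange4]; simp [pvBlk, List.foldl]

-- B's innermost i-loop is the product of that block
lemma pvInnerB (grid : List (List Int)) (col row : Int) :
    (PySem.List.pyRange 0 4 1).foldl (fun p i => p * pvCell grid (col - i) (row + i)) 1
      = (pvBlk grid col row).foldl (fun a x => a * x) 1 := by
  rw [pvRange4]; simp [pvBlk, List.foldl]

lemma pvFlatMapSingleton {a b : Type} (f : a → b) (l : List a) :
    l.flatMap (fun x => [f x]) = l.map f := by
  induction l with
  | nil => rfl
  | cons x t ih => simp [List.flatMap_cons, ih]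

lemma pvFlatMap_pyGetD {b : Type} (M : List (List Int)) (H : List Int → List b) :
    (PySem.List.pyRange 0 (M.length : Int) 1).flatMap (fun j => H (PySem.List.pyGetD M j []))
      = M.flatMap H := by
  conv_rhs => rw [← PySem.List.map_pyGetD_pyRange_zero' M []]
  rw [List.flatMap_map]

lemma pvDropLast_pyRange (n : Int) :
    (PySem.List.pyRange 0 (n - 3) 1).dropLast = PySem.List.pyRange 0 (n - 4) 1 := by
  by_cases h : 4 ≤ n
  · have h1 : (0 : Int) ≤ n - 4 := by omega
    have h2 : n - 3 = (n - 4) + 1 := by omega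
    rw [h2, PySem.List.pyRange_one_succ_right h1, List.dropLast_concat]
  · rw [PySem.List.pyRange_one_eq_nil (by omega), PySem.List.pyRange_one_eq_nil (by omega)]
    rfl

lemma pvPyRange_step4 (m : Nat) :
    PySem.List.pyRange 0 (4 * (m : Int) - 4) 4
      = (List.range (m - 1)).map (fun k : Nat => ((4 : Int) * (k : Int))) := by
  have h4 : (0 : Int) < 4 := by norm_num
  rw [PySem.List.pyRange_of_pos 0 (4 * (m : Int) - 4) h4]
  have hif : (if (0 : Int) < 4 * (m : Int) - 4 then ((4 * (m : Int) - 4 - 0 + 4 - 1) / 4).toNat else 0)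
      = m - 1 := by
    split_ifs with h <;> omega
  rw [hif]
  simp only [zero_add]


-- extracting the k-th length-4 chunk of a flattened list of 4-blocks
lemma pvFlattenChunk (bs : List (List Int)) (k : Nat) (hb : ∀ b ∈ bs, b.length = 4)
    (hk : k < bs.length) : (bs.flatten.drop (4 * k)).take 4 = bs[k] := by
  induction bs generalizing k with
  | nil => simp at hk
  | cons b bs ih =>
    have hbl : b.length = 4 := hb b (by simp)
    cases k with
    | zero =>
      simp only [Nat.mul_zero, List.drop_zero, List.flatten_cons, List.getElem_cons_zero]
      exact List.take_left' hbl
    | succ k =>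
      have h4 : 4 * (k + 1) = b.length + 4 * k := by omega
      rw [List.flatten_cons, h4, List.drop_append]
      have he : List.drop (b.length + 4 * k) b = [] := List.drop_eq_nil_of_le (by omega)
      have hs : b.length + 4 * k - b.length = 4 * k := by omega
      rw [he, hs, List.nil_append, List.getElem_cons_succ]
      exact ih k (fun x hx => hb x (by simp [hx])) (by simpa using hk)

lemma pvFlattenLen (bs : List (List Int)) (hb : ∀ b ∈ bs, b.length = 4) :
    bs.flatten.length = 4 * bs.length := by
  induction bs with
  | nil => simp
  | cons b t ih =>
    have := hb b (by simp)
    simp [List.flatten_cons, this, ih (fun x hx => hb x (by simp [hx]))]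
    omega

-- A's re-chunking of one flattened diagonal list keeps every block but the last
lemma pvChunks (bs : List (List Int)) (hb : ∀ b ∈ bs, b.length = 4) :
    (PySem.List.pyRange 0 ((bs.flatten.length : Int) - 4) 4).map
      (fun sub => (PySem.List.slice bs.flatten (some sub) (some (sub + 4))).map (fun i => i))
      = bs.dropLast := by
  have hlen : ((bs.flatten.length : Int)) - 4 = 4 * (bs.length : Int) - 4 := by
    rw [pvFlattenLen bs hb]; push_cast; ring
  rw [hlen, pvPyRange_step4, List.map_map]
  apply List.ext_getElem
  · simp [List.length_dropLast]
  · intro k h1 h2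
    simp only [List.getElem_map, List.getElem_range, Function.comp_apply, List.getElem_dropLast]
    have hk : k < bs.length := by
      rw [List.length_dropLast] at h2; omega
    have hc2 : (4 * (k : Int)) + 4 = ((4 * k : Nat) : Int) + ((4 : Nat) : Int) := by push_cast; ring
    have hc : (4 * (k : Int)) = ((4 * k : Nat) : Int) := by push_cast; ring
    rw [hc2, hc, PySem.List.slice_natCast_add, pvFlattenChunk bs k hb hk]
    simp

-- both ports compute the max of the same canonical list of products
def pvCanon (grid : List (List Int)) : List Int :=
  (PySem.List.pyRange ((grid.length : Int) - 1) 0 (-4)).flatMap (fun col =>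
    (PySem.List.pyRange 0 ((grid.length : Int) - 4) 1).map (fun row =>
      (pvBlk grid col row).foldl (fun a x => a * x) 1))

lemma pvB_eq_canon (grid : List (List Int)) :
    right_to_left_diag_alt grid = (PySem.List.max? (pvCanon grid) (fun x => x)).getD 0 := by
  unfold right_to_left_diag_alt pvCanon
  simp only [pvInnerB, PySem.List.foldl_append_singleton_eq_map, PySem.List.foldl_append_eq_flatMap,
    List.nil_append]

lemma pvA_eq_canon (grid : List (List Int)) :
    right_to_left_diag grid = (PySem.List.max? (pvCanon grid) (fun x => x)).getD 0 := by
  unfold right_to_left_diag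
  simp only [pvInnerA]
  simp only [PySem.List.foldl_append_eq_flatMap, List.nil_append]
  simp only [pvFlatMapSingleton]
  rw [pvFlatMap_pyGetD
    ((PySem.List.pyRange ((grid.length : Int) - 1) 0 (-4)).map (fun col =>
      (PySem.List.pyRange 0 ((grid.length : Int) - 3) 1).flatMap (fun row => pvBlk grid col row)))
    (fun d => (PySem.List.pyRange 0 ((d.length : Int) - 4) 4).map
      (fun sub => (PySem.List.slice d (some sub) (some (sub + 4))).map (fun i => i)))]
  rw [List.flatMap_map, List.map_flatMap]
  unfold pvCanon
  congr 1
  congr 1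
  congr 1
  funext col
  rw [show (PySem.List.pyRange 0 ((grid.length : Int) - 3) 1).flatMap (fun row => pvBlk grid col row)
      = ((PySem.List.pyRange 0 ((grid.length : Int) - 3) 1).map (fun row => pvBlk grid col row)).flatten
    from List.flatMap_def]
  rw [pvChunks _ (by
    intro b hbm
    simp only [List.mem_map] at hbm
    obtain ⟨r, _, hr⟩ := hbm
    rw [← hr]
    exact pvBlk_length grid col r)]
  rw [← List.map_dropLast, pvDropLast_pyRange, List.map_map]
  rfl

-- ===== VERDICT (by name: the statement is the Claim_ definition above) =====
theorem right_to_left_diag_spec : Claim_equal_right_to_left_diag := by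
  intro grid _ _
  unfold Spec_right_to_left_diag
  rw [pvA_eq_canon, pvB_eq_canon]
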